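-- pv_equiv track=rewrite | github.com/RuslanSerdiuk/DevOps_Tasks_and_solutions | Python/CSV Formatter/csv_formatter.py | take_columns
-- ===== SOURCE A (Python) =====
-- from collections import defaultdict
--
-- def take_columns(table, first_column_index, last_column_index):
--     """
--     :param table:
--     :param first_column_index:
--     :param last_column_index:
--     :return: selected columns
--     """
--     last_column_index += 1
--     columns = defaultdict(list)
--     result = []
--     for row in table:
--         for i, v in enumerate(row):
--             columns[i].append(v)
--     for i in range(first_column_index, last_column_index):
--         result.append(columns[i])
--     return result
-- ===== SOURCE B (Python) =====
-- def take_columns(table, first_column_index, last_column_index):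
--     """
--     :param table:
--     :param first_column_index:
--     :param last_column_index:
--     :return: selected columns
--     """
--     result = []
--     for i in range(first_column_index, last_column_index + 1):
--         result.append([row[i] for row in table if 0 <= i < len(row)])
--     return result
-- ===== Notes on version B (the rewrite author's own statement) =====
-- stated objective: simpler
-- what changed: B never materialises a dict of all columns: for each requested index it scans the table directly and collects row[i] from the rows long enough, so only the requested range is ever built.
import Mathlib
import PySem

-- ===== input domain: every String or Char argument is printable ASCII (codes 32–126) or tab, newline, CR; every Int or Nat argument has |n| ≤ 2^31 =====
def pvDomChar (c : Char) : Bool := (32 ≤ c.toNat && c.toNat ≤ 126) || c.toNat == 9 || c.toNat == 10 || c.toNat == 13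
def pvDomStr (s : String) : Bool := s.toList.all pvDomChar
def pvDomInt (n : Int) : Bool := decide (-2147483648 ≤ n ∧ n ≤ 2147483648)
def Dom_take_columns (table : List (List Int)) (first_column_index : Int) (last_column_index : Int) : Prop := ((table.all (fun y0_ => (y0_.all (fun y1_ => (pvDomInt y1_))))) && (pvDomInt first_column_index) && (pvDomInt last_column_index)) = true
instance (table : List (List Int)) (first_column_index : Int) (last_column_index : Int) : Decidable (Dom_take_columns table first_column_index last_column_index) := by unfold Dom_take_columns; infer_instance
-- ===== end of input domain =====

-- B avoids building the full column dict: one direct scan of the table per requested index (simpler).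

-- ===== PORT A =====
def take_columns (table : List (List Int)) (first_column_index : Int) (last_column_index : Int) : List (List Int) :=
  let last_column_index := last_column_index + 1
  let columns : PySem.Dict Int (List Int) :=
    table.foldl (fun d row =>
      (PySem.List.enumerate row).foldl
        (fun d iv => d.insert iv.1 (d.getD iv.1 [] ++ [iv.2])) d)
      PySem.Dict.empty
  (PySem.List.pyRange first_column_index last_column_index 1).foldl
    (fun result i => result ++ [columns.getD i []]) []

-- ===== PORT B =====
def take_columns_alt (table : List (List Int)) (first_column_index : Int) (last_column_index : Int) : List (List Int) :=
  (PySem.List.pyRange first_column_index (last_column_index + 1) 1).foldl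
    (fun result i => result ++
      [table.filterMap (fun row =>
        if 0 ≤ i ∧ i < (row.length : Int) then some (PySem.List.pyGetD row i 0) else none)]) []

-- ===== PRECONDITION & SPEC =====
def Spec_take_columns (table : List (List Int)) (first_column_index : Int) (last_column_index : Int) (out : List (List Int)) : Prop := out = take_columns_alt table first_column_index last_column_index
instance (table : List (List Int)) (first_column_index : Int) (last_column_index : Int) (out : List (List Int)) : Decidable (Spec_take_columns table first_column_index last_column_index out) := by unfold Spec_take_columns; infer_instance

-- ===== CLAIM (what is proved, stated in full; the proofs are below) =====
def Claim_equal_take_columns : Prop := ∀ (table : List (List Int)) (first_column_index : Int) (last_column_index : Int), Dom_take_columns table first_column_index last_column_index → Spec_take_columns table first_column_index last_column_index (take_columns table first_column_index last_column_index)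

-- ===== LEMMAS AND PROOFS =====

-- the list kept at key i after the inner (enumerate) fold: old list ++ matching values
theorem pv_inner_fold (ps : List (Int × Int)) (d : PySem.Dict Int (List Int)) (i : Int) :
    ((ps.foldl (fun d iv => d.insert iv.1 (d.getD iv.1 [] ++ [iv.2])) d).getD i [])
      = d.getD i [] ++ ps.filterMap (fun p => if p.1 = i then some p.2 else none) := by
  induction ps generalizing d with
  | nil => simp
  | cons p ps ih =>
    simp only [List.foldl_cons, List.filterMap_cons, ih, PySem.Dict.getD_insert]
    by_cases h : p.1 = i
    · simp [h]
    · have h' : ¬ i = p.1 := fun e => h e.symm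
      simp [h, h']

-- the values enumerate contributes at key i: row[i-s] if s ≤ i < s + len row
theorem pv_enum_filter (row : List Int) (s i : Int) :
    (PySem.List.enumerate row s).filterMap (fun p => if p.1 = i then some p.2 else none)
      = if s ≤ i ∧ i < s + row.length then [PySem.List.pyGetD row (i - s) 0] else [] := by
  induction row generalizing s with
  | nil => simp [PySem.List.enumerate_nil]
  | cons x xs ih =>
    simp only [PySem.List.enumerate_cons, List.filterMap_cons, ih (s + 1)]
    by_cases h : s = i
    · subst h
      rw [if_pos rfl, if_neg (by omega),
        if_pos (by simp only [List.length_cons]; push_cast; omega)]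
      have hz : s - s = 0 := by omega
      simp [PySem.List.pyGetD]
    · rw [if_neg h]
      by_cases h2 : s + 1 ≤ i ∧ i < s + 1 + (xs.length : Int)
      · rw [if_pos h2, if_pos (by simp only [List.length_cons]; push_cast; omega)]
        have : i - s = (i - (s + 1)) + 1 := by omega
        rw [this]
        obtain ⟨k, hk⟩ : ∃ k : Nat, i - (s + 1) = (k : Int) := ⟨(i - (s+1)).toNat, by omega⟩
        rw [hk]
        have : ((k : Int) + 1) = ((k + 1 : Nat) : Int) := by push_cast; ring
        rw [this, PySem.List.pyGetD_natCast, PySem.List.pyGetD_natCast]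
        simp
      · rw [if_neg h2, if_neg (by simp only [List.length_cons]; push_cast; omega)]

-- B's column i, as a filterMap over the table
def pv_col (table : List (List Int)) (i : Int) : List Int :=
  table.filterMap (fun row =>
    if 0 ≤ i ∧ i < (row.length : Int) then some (PySem.List.pyGetD row i 0) else none)

-- A's dict, after folding the whole table, holds exactly B's column at every key
theorem pv_outer_fold (table : List (List Int)) (d : PySem.Dict Int (List Int)) (i : Int) :
    ((table.foldl (fun d row =>
        (PySem.List.enumerate row).foldl
          (fun d iv => d.insert iv.1 (d.getD iv.1 [] ++ [iv.2])) d) d).getD i [])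
      = d.getD i [] ++ pv_col table i := by
  induction table generalizing d with
  | nil => simp [pv_col]
  | cons row rest ih =>
    simp only [List.foldl_cons, ih, pv_inner_fold, pv_enum_filter]
    simp only [pv_col, List.filterMap_cons]
    have hz : i - 0 = i := by omega
    by_cases h : 0 ≤ i ∧ i < (row.length : Int)
    · simp [h, hz, List.append_assoc]
    · simp [h]

-- ===== VERDICT (by name: the statement is the Claim_ definition above) =====
theorem take_columns_spec : Claim_equal_take_columns := by
  intro table first last _
  unfold Spec_take_columns take_columns take_columns_alt
  simp only
  induction PySem.List.pyRange first (last + 1) 1 using List.reverseRecOn with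
  | nil => rfl
  | append_singleton xs x ih =>
    simp only [List.foldl_append, List.foldl_cons, List.foldl_nil, ih]
    rw [pv_outer_fold table PySem.Dict.empty x]
    simp [PySem.Dict.getD, PySem.Dict.empty, PySem.Dict.get?, pv_col]
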